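-- pv_equiv track=rewrite | github.com/jonbesga/most-used-libraries | lib.py | get_packages_packages_json
-- ===== SOURCE A (Python) =====
-- def get_packages_packages_json(text):
--     reading_packages = False
--     found_packages = []
--     for line in text.split('\n'):
--         if "dependencies" in line or 'devDependencies' in line:
--             reading_packages = True
--             continue
--         elif reading_packages and '}' in line:
--             reading_packages = False
--             continue
--
--         if reading_packages:
--             found_packages.append(line.split(':')[0].strip().replace("\"", ""))
--     return found_packages
-- ===== SOURCE B (Python) =====
-- def get_packages_packages_json(text):
--     it = iter(text.split('\n'))
--     found_packages = []
--     for line in it: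
--         if "dependencies" in line or 'devDependencies' in line:
--             # consume the section with an inner loop over the same iterator
--             for line in it:
--                 if "dependencies" in line or 'devDependencies' in line:
--                     continue
--                 if '}' in line:
--                     break
--                 found_packages.append(line.split(':')[0].strip().replace("\"", ""))
--     return found_packages
-- ===== Notes on version B (the rewrite author's own statement) =====
-- stated objective: alternative
-- what changed: Replaces A's single pass with a boolean reading_packages flag by two nested loops over one shared line iterator: the outer loop scans for a section header, the inner loop consumes the section's lines until a closing-brace line, so no mode flag is maintained.
import Mathlib
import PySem

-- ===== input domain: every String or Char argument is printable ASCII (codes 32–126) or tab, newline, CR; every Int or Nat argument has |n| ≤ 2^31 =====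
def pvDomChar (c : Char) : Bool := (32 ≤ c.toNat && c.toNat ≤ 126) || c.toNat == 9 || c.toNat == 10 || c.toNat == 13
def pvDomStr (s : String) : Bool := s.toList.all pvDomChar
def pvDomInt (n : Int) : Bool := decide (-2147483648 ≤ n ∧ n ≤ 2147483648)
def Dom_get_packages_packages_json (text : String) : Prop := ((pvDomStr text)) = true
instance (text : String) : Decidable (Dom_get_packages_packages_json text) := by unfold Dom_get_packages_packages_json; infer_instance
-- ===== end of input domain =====

-- B replaces A's boolean mode flag by nested loops over one shared line iterator (alternative decomposition, same cost).

-- ===== PORT A =====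
-- header test: "dependencies" in line or 'devDependencies' in line
def pvHeaderA (line : String) : Bool :=
  PySem.Str.isIn "dependencies" line || PySem.Str.isIn "devDependencies" line

-- line.split(':')[0].strip().replace('"', '')
def pvCleanA (line : String) : String :=
  PySem.Str.replace (PySem.Str.strip (((PySem.Str.split? line ":").getD []).headD "")) "\"" ""

def get_packages_packages_json (text : String) : List String :=
  (((PySem.Str.split? text "\n").getD []).foldl
    (fun (st : Bool × List String) line =>
      if pvHeaderA line then (true, st.2)
      else if st.1 && PySem.Str.isIn "}" line then (false, st.2)
      else if st.1 then (st.1, st.2 ++ [pvCleanA line])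
      else st)
    (false, [])).2

-- ===== PORT B =====
def pvHeaderB (line : String) : Bool :=
  PySem.Str.isIn "dependencies" line || PySem.Str.isIn "devDependencies" line

def pvCleanB (line : String) : String :=
  PySem.Str.replace (PySem.Str.strip (((PySem.Str.split? line ":").getD []).headD "")) "\"" ""

mutual
  -- outer loop: scan for a section header
  def pvOuterB : List String → List String
    | [] => []
    | line :: rest => if pvHeaderB line then pvInnerB rest else pvOuterB rest
  -- inner loop over the same iterator: consume the section
  def pvInnerB : List String → List String
    | [] => []
    | line :: rest =>
      if pvHeaderB line then pvInnerB rest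
      else if PySem.Str.isIn "}" line then pvOuterB rest
      else pvCleanB line :: pvInnerB rest
end

def get_packages_packages_json_alt (text : String) : List String :=
  pvOuterB ((PySem.Str.split? text "\n").getD [])

-- ===== PRECONDITION & SPEC =====
def Spec_get_packages_packages_json (text : String) (out : List String) : Prop := out = get_packages_packages_json_alt text
instance (text : String) (out : List String) : Decidable (Spec_get_packages_packages_json text out) := by unfold Spec_get_packages_packages_json; infer_instance

-- ===== CLAIM (what is proved, stated in full; the proofs are below) =====
def Claim_equal_get_packages_packages_json : Prop := ∀ (text : String), Dom_get_packages_packages_json text → Spec_get_packages_packages_json text (get_packages_packages_json text)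

-- ===== LEMMAS AND PROOFS =====

theorem pv_loop_eq (lines : List String) : ∀ acc : List String,
    ((lines.foldl
      (fun (st : Bool × List String) line =>
        if pvHeaderA line then (true, st.2)
        else if st.1 && PySem.Str.isIn "}" line then (false, st.2)
        else if st.1 then (st.1, st.2 ++ [pvCleanA line])
        else st)
      (false, acc)).2 = acc ++ pvOuterB lines) ∧
    ((lines.foldl
      (fun (st : Bool × List String) line =>
        if pvHeaderA line then (true, st.2)
        else if st.1 && PySem.Str.isIn "}" line then (false, st.2)
        else if st.1 then (st.1, st.2 ++ [pvCleanA line])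
        else st)
      (true, acc)).2 = acc ++ pvInnerB lines) := by
  induction lines with
  | nil => intro acc; simp [pvOuterB, pvInnerB]
  | cons line rest ih =>
    intro acc
    by_cases h : pvHeaderA line = true
    · have hb : pvHeaderB line = true := h
      have ih2 := (ih acc).2
      constructor
      · simp only [List.foldl_cons, h, if_true, pvOuterB, hb]
        exact ih2
      · simp only [List.foldl_cons, h, if_true, pvInnerB, hb]
        exact ih2
    · have ha : pvHeaderA line = false := by simpa using h
      have hb : pvHeaderB line = false := ha
      constructor
      · have ih1 := (ih acc).1
        simp only [List.foldl_cons, ha, Bool.false_eq_true, if_false, Bool.false_and,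
          pvOuterB, hb]
        exact ih1
      · by_cases hc : PySem.Str.isIn "}" line = true
        · have ih1 := (ih acc).1
          simp only [List.foldl_cons, ha, Bool.false_eq_true, if_false, Bool.true_and, hc,
            if_true, pvInnerB, hb]
          exact ih1
        · have hc' : PySem.Str.isIn "}" line = false := by simpa using hc
          have ih2 := (ih (acc ++ [pvCleanA line])).2
          simp only [List.foldl_cons, ha, Bool.false_eq_true, if_false, Bool.true_and, hc',
            if_true, pvInnerB, hb]
          rw [ih2]
          simp [pvCleanA, pvCleanB]

-- ===== VERDICT (by name: the statement is the Claim_ definition above) =====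
theorem get_packages_packages_json_spec : Claim_equal_get_packages_packages_json := by
  intro text _
  unfold Spec_get_packages_packages_json get_packages_packages_json get_packages_packages_json_alt
  simpa using (pv_loop_eq ((PySem.Str.split? text "\n").getD []) []).1
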